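-- pv_equiv track=rewrite | github.com/pc5401/my_BOJ | 백준/Silver/21890. File names/File names.py | solve
-- ===== SOURCE A (Python) =====
-- def solve(n: int, filenames: list[str]) -> int:
--     count = 0
--     for fname in filenames:
--         if fname.count('.') != 1:
--             continue
--         file_part, ext_part = fname.split('.')
--         if not file_part or not ext_part:
--             continue
--         if len(file_part) > 8 or len(ext_part) > 3:
--             continue
--         if not (file_part.isalpha() and ext_part.isalpha()):
--             continue
--         count += 1
--     return count
-- ===== SOURCE B (Python) =====
-- def solve(n: int, filenames: list[str]) -> int:
--     total = 0
--     for fname in filenames: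
--         # one left-to-right scan of the characters: track whether the single
--         # dot has been seen and the lengths of the name and extension parts
--         seen_dot = False
--         name_len = 0
--         ext_len = 0
--         ok = True
--         for ch in fname:
--             if ch == '.':
--                 if seen_dot:
--                     ok = False
--                     break
--                 seen_dot = True
--             elif ch.isalpha():
--                 if seen_dot:
--                     ext_len += 1
--                 else:
--                     name_len += 1
--             else:
--                 ok = False
--                 break
--         if ok and seen_dot and 1 <= name_len <= 8 and 1 <= ext_len <= 3:
--             total += 1
--     return total
-- ===== Notes on version B (the rewrite author's own statement) =====
-- stated objective: alternative
-- what changed: B replaces A's string-method pipeline (count('.'), split('.'), len, isalpha on whole parts) with a single character-level state machine that scans each filename once, tracking whether the dot was seen and the running name/extension lengths, and accepts from that final state.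
import Mathlib
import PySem

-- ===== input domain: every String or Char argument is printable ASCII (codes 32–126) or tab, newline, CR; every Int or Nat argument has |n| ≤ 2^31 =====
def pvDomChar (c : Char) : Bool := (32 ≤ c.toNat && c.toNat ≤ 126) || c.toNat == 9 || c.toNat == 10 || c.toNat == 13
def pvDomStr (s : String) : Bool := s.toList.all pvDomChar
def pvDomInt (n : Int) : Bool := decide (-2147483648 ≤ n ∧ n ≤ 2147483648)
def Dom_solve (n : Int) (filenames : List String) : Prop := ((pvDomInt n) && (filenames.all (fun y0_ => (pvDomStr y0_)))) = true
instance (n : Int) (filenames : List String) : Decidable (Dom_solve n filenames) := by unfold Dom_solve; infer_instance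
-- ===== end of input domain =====

-- B re-checks each filename with ONE character-level state machine (dot seen / name length /
-- extension length) instead of A's count('.') + split('.') + per-part len/isalpha pipeline;
-- same cost, different decomposition ("alternative").

-- ===== PORT A =====
def solve (n : Int) (filenames : List String) : Int :=
  filenames.foldl (fun count fname =>
    if PySem.Str.count fname "." ≠ 1 then count
    else
      match PySem.Str.split? fname "." with
      | some [file_part, ext_part] =>
        if PySem.Str.len file_part = 0 ∨ PySem.Str.len ext_part = 0 then count
        else if 8 < PySem.Str.len file_part ∨ 3 < PySem.Str.len ext_part then count
        else if ¬(PySem.Str.strIsalpha file_part = true ∧ PySem.Str.strIsalpha ext_part = true) then count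
        else count + 1
      | _ => count) 0    -- the 2-element match is guaranteed by count('.') == 1; other arities keep `count` (unreachable)

-- ===== PORT B =====
-- the inner `for ch in fname` loop of Source B: state = (seen_dot, name_len, ext_len); none = the `break` with ok = False
def scanB : List Char → Bool → Nat → Nat → Option (Bool × Nat × Nat)
  | [], seen, nl, el => some (seen, nl, el)
  | c :: rest, seen, nl, el =>
    if c = '.' then
      if seen then none else scanB rest true nl el
    else if PySem.Chars.isalpha c then
      if seen then scanB rest seen nl (el + 1) else scanB rest seen (nl + 1) el
    else none

def solve_alt (n : Int) (filenames : List String) : Int :=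
  filenames.foldl (fun total fname =>
    match scanB fname.toList false 0 0 with
    | some (seen, name_len, ext_len) =>
      if seen = true ∧ 1 ≤ name_len ∧ name_len ≤ 8 ∧ 1 ≤ ext_len ∧ ext_len ≤ 3 then total + 1 else total
    | none => total) 0

-- ===== PRECONDITION & SPEC =====
def Spec_solve (n : Int) (filenames : List String) (out : Int) : Prop := out = solve_alt n filenames
instance (n : Int) (filenames : List String) (out : Int) : Decidable (Spec_solve n filenames out) := by unfold Spec_solve; infer_instance

-- ===== CLAIM (what is proved, stated in full; the proofs are below) =====
def Claim_equal_solve : Prop := ∀ (n : Int) (filenames : List String), Dom_solve n filenames → Spec_solve n filenames (solve n filenames)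

-- ===== LEMMAS AND PROOFS =====

theorem not_dot_mem_of_all_alpha {a : List Char} (h : a.all PySem.Chars.isalpha = true) :
    '.' ∉ a := by
  intro hm
  have := List.all_eq_true.mp h _ hm
  rw [show PySem.Chars.isalpha '.' = false from by decide] at this
  exact absurd this (by simp)

theorem countGo_eq (l : List Char) : ∀ (fuel acc : Nat), l.length ≤ fuel →
    PySem.Chars.count.go ['.'] fuel l acc = acc + l.count '.' := by
  induction l with
  | nil => intro fuel acc _; cases fuel <;> simp [PySem.Chars.count.go]
  | cons c t ih =>
    intro fuel acc hf
    cases fuel with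
    | zero => simp at hf
    | succ f =>
      have ht : t.length ≤ f := by simpa using hf
      by_cases hc : c = '.'
      · subst hc
        simp [PySem.Chars.count.go, List.isPrefixOf, ih f (acc + 1) ht]
        omega
      · have : (['.'].isPrefixOf (c :: t)) = false := by
          simp [List.isPrefixOf]; exact fun h => absurd h.symm hc
        simp [PySem.Chars.count.go, this, ih f acc ht, hc]

theorem count_eq_listCount (cs : List Char) :
    PySem.Chars.count cs ['.'] = cs.count '.' := by
  simpa [PySem.Chars.count] using countGo_eq cs cs.length 0 le_rfl

theorem splitGo_no_dot (l : List Char) (h : '.' ∉ l) :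
    ∀ (fuel : Nat) (cur : List Char) (acc : List (List Char)),
    PySem.Chars.splitOn.go ['.'] fuel l cur acc = acc.reverse ++ [cur.reverse ++ l] := by
  induction l with
  | nil => intro fuel cur acc; cases fuel <;> simp [PySem.Chars.splitOn.go]
  | cons c t ih =>
    intro fuel cur acc
    have hc : c ≠ '.' := fun h' => h (h' ▸ List.mem_cons_self)
    have ht : '.' ∉ t := fun h' => h (List.mem_cons_of_mem _ h')
    cases fuel with
    | zero => simp [PySem.Chars.splitOn.go]
    | succ f =>
      have hp : (['.'].isPrefixOf (c :: t)) = false := by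
        simp [List.isPrefixOf]; exact fun h => absurd h.symm hc
      simp [PySem.Chars.splitOn.go, hp, ih ht f (c :: cur) acc]

theorem splitGo_dot (a : List Char) (ha : '.' ∉ a) :
    ∀ (b : List Char) (fuel : Nat) (cur : List Char) (acc : List (List Char)),
    a.length < fuel →
    PySem.Chars.splitOn.go ['.'] fuel (a ++ '.' :: b) cur acc =
      PySem.Chars.splitOn.go ['.'] (fuel - a.length - 1) b [] ((cur.reverse ++ a) :: acc) := by
  induction a with
  | nil =>
    intro b fuel cur acc hf
    cases fuel with
    | zero => omega
    | succ f => simp [PySem.Chars.splitOn.go, List.isPrefixOf]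
  | cons c a' ih =>
    intro b fuel cur acc hf
    have hc : c ≠ '.' := fun h' => ha (h' ▸ List.mem_cons_self)
    have ha' : '.' ∉ a' := fun h' => ha (List.mem_cons_of_mem _ h')
    cases fuel with
    | zero => omega
    | succ f =>
      have hp : (['.'].isPrefixOf (c :: (a' ++ '.' :: b))) = false := by
        simp [List.isPrefixOf]; exact fun h => absurd h.symm hc
      have hlt : a'.length < f := by simp only [List.length_cons] at hf; omega
      have : (Nat.succ f) - (c :: a').length - 1 = f - a'.length - 1 := by simp
      rw [show ((c :: a') ++ '.' :: b) = c :: (a' ++ '.' :: b) by simp]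
      simp only [PySem.Chars.splitOn.go, hp, Bool.false_eq_true, if_false, this]
      rw [ih ha' b f (c :: cur) acc hlt]
      simp

theorem splitOn_decomp (a b : List Char) (ha : '.' ∉ a) (hb : '.' ∉ b) :
    PySem.Chars.splitOn (a ++ '.' :: b) ['.'] = [a, b] := by
  unfold PySem.Chars.splitOn
  rw [splitGo_dot a ha b _ [] [] (by simp only [List.length_append, List.length_cons]; omega)]
  rw [splitGo_no_dot b hb]
  simp

theorem first_dot {cs : List Char} (h : '.' ∈ cs) :
    ∃ a b : List Char, cs = a ++ '.' :: b ∧ '.' ∉ a := by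
  induction cs with
  | nil => simp at h
  | cons c t ih =>
    by_cases hc : c = '.'
    · exact ⟨[], t, by simp [hc], by simp⟩
    · have ht : '.' ∈ t := by
        rcases List.mem_cons.mp h with h1 | h1
        · exact absurd h1.symm hc
        · exact h1
      obtain ⟨a, b, rfl, ha⟩ := ih ht
      refine ⟨c :: a, b, rfl, ?_⟩
      simp only [List.mem_cons, not_or]
      exact ⟨fun h => hc h.symm, ha⟩

theorem count_one_of_decomp {a b : List Char} (ha : '.' ∉ a) (hb : '.' ∉ b) :
    (a ++ '.' :: b).count '.' = 1 := by
  rw [List.count_append, List.count_cons_self, List.count_eq_zero.mpr ha, List.count_eq_zero.mpr hb]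

theorem scanB_seen (cs : List Char) : ∀ (nl el : Nat),
    scanB cs true nl el =
      if cs.all PySem.Chars.isalpha then some (true, nl, el + cs.length) else none := by
  induction cs with
  | nil => intro nl el; simp [scanB]
  | cons c t ih =>
    intro nl el
    by_cases hc : c = '.'
    · subst hc
      simp [scanB, show PySem.Chars.isalpha '.' = false from by decide]
    · by_cases halpha : PySem.Chars.isalpha c = true
      · simp [scanB, hc, halpha, ih nl (el + 1)]
        split_ifs <;> (try simp) <;> omega
      · simp [scanB, hc, halpha]

theorem scanB_unseen (a : List Char) (ha : '.' ∉ a) : ∀ (b : List Char) (nl el : Nat),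
    scanB (a ++ '.' :: b) false nl el =
      if a.all PySem.Chars.isalpha && b.all PySem.Chars.isalpha then
        some (true, nl + a.length, el + b.length)
      else none := by
  induction a with
  | nil => intro b nl el; simp [scanB, scanB_seen]
  | cons c a' ih =>
    intro b nl el
    have hc : c ≠ '.' := fun h' => ha (h' ▸ List.mem_cons_self)
    have ha' : '.' ∉ a' := fun h' => ha (List.mem_cons_of_mem _ h')
    by_cases halpha : PySem.Chars.isalpha c = true
    · simp [scanB, hc, halpha, ih ha' b (nl + 1) el]
      split_ifs <;> (try simp) <;> omega
    · simp [scanB, hc, halpha]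

theorem scanB_no_dot {cs : List Char} (h : '.' ∉ cs) : ∀ (nl el q r : Nat),
    scanB cs false nl el ≠ some (true, q, r) := by
  induction cs with
  | nil => intro nl el q r; simp [scanB]
  | cons c t ih =>
    intro nl el q r
    have hc : c ≠ '.' := fun h' => h (h' ▸ List.mem_cons_self)
    have ht : '.' ∉ t := fun h' => h (List.mem_cons_of_mem _ h')
    by_cases halpha : PySem.Chars.isalpha c = true
    · simp [scanB, hc, halpha]; exact ih ht (nl + 1) el q r
    · simp [scanB, hc, halpha]

-- per-filename agreement of the two loop bodies
theorem body_eq (count : Int) (fname : String) :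
    (if PySem.Str.count fname "." ≠ 1 then count
     else
      match PySem.Str.split? fname "." with
      | some [file_part, ext_part] =>
        if PySem.Str.len file_part = 0 ∨ PySem.Str.len ext_part = 0 then count
        else if 8 < PySem.Str.len file_part ∨ 3 < PySem.Str.len ext_part then count
        else if ¬(PySem.Str.strIsalpha file_part = true ∧ PySem.Str.strIsalpha ext_part = true) then count
        else count + 1
      | _ => count) =
    (match scanB fname.toList false 0 0 with
     | some (seen, name_len, ext_len) =>
       if seen = true ∧ 1 ≤ name_len ∧ name_len ≤ 8 ∧ 1 ≤ ext_len ∧ ext_len ≤ 3 then count + 1 else count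
     | none => count) := by
  have hcount : PySem.Str.count fname "." = fname.toList.count '.' := by
    simp [PySem.Str.count, count_eq_listCount]
  have hsplit : PySem.Str.split? fname "." =
      some ((PySem.Chars.splitOn fname.toList ['.']).map String.ofList) := by
    simp [PySem.Str.split?, PySem.Chars.split?]
  by_cases hdot : '.' ∈ fname.toList
  · obtain ⟨a, b, hdec, ha⟩ := first_dot hdot
    by_cases hbdot : '.' ∈ b
    · -- a second dot: A's count test fails, B's scan hits a non-letter after the dot
      have hcnt2 : fname.toList.count '.' ≠ 1 := by
        rw [hdec, List.count_append, List.count_cons_self, List.count_eq_zero.mpr ha]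
        have : 0 < b.count '.' := List.count_pos_iff.mpr hbdot
        omega
      have hba : b.all PySem.Chars.isalpha = false := by
        by_cases h : b.all PySem.Chars.isalpha = true
        · exact absurd hbdot (not_dot_mem_of_all_alpha h)
        · simpa using h
      rw [hcount, if_pos hcnt2, hdec, scanB_unseen a ha b 0 0, hba]
      simp
    · -- exactly one dot: both sides decide from the (name, extension) decomposition
      have hcnt1 : fname.toList.count '.' = 1 := by rw [hdec]; exact count_one_of_decomp ha hbdot
      have hsp : PySem.Chars.splitOn fname.toList ['.'] = [a, b] := by
        rw [hdec]; exact splitOn_decomp a b ha hbdot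
      rw [hcount, hdec, scanB_unseen a ha b 0 0]
      rw [hdec] at hcnt1
      rw [if_neg (by simpa using hcnt1), hsplit, hsp]
      simp only [List.map_cons, List.map_nil]
      simp only [PySem.Str.len_eq, String.toList_ofList, PySem.Str.strIsalpha,
        PySem.Chars.strIsalpha]
      by_cases haa : a.all PySem.Chars.isalpha = true
      · by_cases hba : b.all PySem.Chars.isalpha = true
        · rw [haa, hba]
          simp only [Bool.and_self, if_true]
          split_ifs with h1 h2 h3 h4 h5 h6 <;> try rfl
          · exfalso; rcases h2 with ⟨-, c1, c2, c3, c4⟩; rcases h1 with h | h <;> omega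
          · exfalso; rcases h4 with ⟨-, c1, c2, c3, c4⟩; rcases h3 with h | h <;> omega
          · exfalso
            apply h6
            have hane : a ≠ [] := by intro he; subst he; simp at h5
            have hbne : b ≠ [] := by intro he; subst he; simp at h5
            have hla := List.length_pos_iff.mpr hane
            have hlb := List.length_pos_iff.mpr hbne
            refine ⟨trivial, ?_, ?_, ?_, ?_⟩ <;> omega
          · exfalso
            apply h5
            have hane : a ≠ [] := by intro he; subst he; simp at h1
            have hbne : b ≠ [] := by intro he; subst he; simp at h1
            exact ⟨by simp [hane], by simp [hbne]⟩
        · have hba' : b.all PySem.Chars.isalpha = false := by simpa using hba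
          rw [haa, hba']
          simp only [Bool.and_false, Bool.false_eq_true, if_false]
          by_cases h1 : (a.length : Int) = 0 ∨ (b.length : Int) = 0
          · rw [if_pos h1]
          · rw [if_neg h1]
            by_cases h2 : 8 < (a.length : Int) ∨ 3 < (b.length : Int)
            · rw [if_pos h2]
            · rw [if_neg h2]
              rw [if_pos (by rintro ⟨-, hQ⟩; simp at hQ)]
      · have haa' : a.all PySem.Chars.isalpha = false := by simpa using haa
        rw [haa']
        simp only [Bool.false_and, Bool.false_eq_true, if_false]
        by_cases h1 : (a.length : Int) = 0 ∨ (b.length : Int) = 0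
        · rw [if_pos h1]
        · rw [if_neg h1]
          by_cases h2 : 8 < (a.length : Int) ∨ 3 < (b.length : Int)
          · rw [if_pos h2]
          · rw [if_neg h2]
            rw [if_pos (by rintro ⟨hP, -⟩; simp at hP)]
  · -- no dot at all: A's count test fails, B never sets seen_dot
    have hcnt0 : fname.toList.count '.' = 0 := List.count_eq_zero.mpr hdot
    rw [hcount, if_pos (by omega)]
    rcases hsb : scanB fname.toList false 0 0 with _ | ⟨seen, nl, el⟩
    · rfl
    · rcases Bool.eq_false_or_eq_true seen with hs | hs
      · subst hs; exact absurd hsb (scanB_no_dot hdot 0 0 nl el)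
      · subst hs; simp

-- ===== VERDICT (by name: the statement is the Claim_ definition above) =====
theorem solve_spec : Claim_equal_solve := by
  intro n filenames _
  unfold Spec_solve solve solve_alt
  exact PySem.List.foldl_congr_mem filenames _ _ 0 (fun acc x hx => body_eq acc x)
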